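-- pv_equiv track=rewrite | github.com/ghdic/CodingProblemSolving | programmers/체육복.py | solution
-- ===== SOURCE A (Python) =====
-- def solution(n, lost, reserve):
--     lost.sort()
--     reserve_set = set(reserve) - set(lost)
--     lost = [s for s in lost if s not in reserve]
--
--     final_lost = []
--     for s in lost:
--         if s - 1 in reserve_set:
--             reserve_set.remove(s - 1)
--         elif s + 1 in reserve_set:
--             reserve_set.remove(s + 1)
--         else:
--             final_lost.append(s)
--
--     return n - len(final_lost)
-- ===== SOURCE B (Python) =====
-- def solution(n, lost, reserve):
--     lost.sort()
--     rest = sorted(set(reserve) - set(lost))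
--     unmatched = 0
--     j = 0
--     for s in lost:
--         if s in reserve:
--             continue
--         while j < len(rest) and rest[j] < s - 1:
--             j += 1
--         if j < len(rest) and (rest[j] == s - 1 or rest[j] == s + 1):
--             j += 1
--         else:
--             unmatched += 1
--     return n - unmatched
-- ===== Notes on version B (the rewrite author's own statement) =====
-- stated objective: alternative
-- what changed: Replaces the mutable-set greedy (membership test and removal of s-1/s+1 in a hash set) by a two-pointer merge: both lost and the spare set are sorted and a single forward pointer over the sorted spares matches each lost student, never revisiting skipped spares.
import Mathlib
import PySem

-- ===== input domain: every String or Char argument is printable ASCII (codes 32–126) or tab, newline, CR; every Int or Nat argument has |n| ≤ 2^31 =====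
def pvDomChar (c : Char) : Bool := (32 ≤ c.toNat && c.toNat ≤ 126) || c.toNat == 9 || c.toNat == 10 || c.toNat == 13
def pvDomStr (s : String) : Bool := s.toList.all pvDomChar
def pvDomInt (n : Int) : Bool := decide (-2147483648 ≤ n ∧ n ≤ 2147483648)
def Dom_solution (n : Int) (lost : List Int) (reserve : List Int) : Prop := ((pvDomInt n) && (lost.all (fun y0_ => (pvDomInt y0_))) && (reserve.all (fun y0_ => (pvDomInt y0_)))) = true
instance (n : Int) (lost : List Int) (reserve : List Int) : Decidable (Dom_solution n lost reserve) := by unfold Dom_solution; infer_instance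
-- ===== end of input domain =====

-- B replaces A's mutable-set greedy by a two-pointer merge over the sorted spare set (alternative
-- algorithm, similar cost). Equivalence is about the RETURN value; both A and B sort the caller's
-- `lost` list in place (same side effect).

-- ===== PORT A =====
-- the for-loop over lost: state = (reserve_set, final_lost accumulator)
def pvALoop : PySem.Set Int → List Int → List Int → List Int
  | _, fl, [] => fl
  | rs, fl, s :: rest =>
    if PySem.Set.contains rs (s - 1) then pvALoop (PySem.Set.discard rs (s - 1)) fl rest
    else if PySem.Set.contains rs (s + 1) then pvALoop (PySem.Set.discard rs (s + 1)) fl rest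
    else pvALoop rs (fl ++ [s]) rest

def solution (n : Int) (lost : List Int) (reserve : List Int) : Int :=
  let lost1 := PySem.List.sorted lost (fun x => x) false
  let reserveSet := PySem.Set.diff (PySem.Set.ofList reserve) (PySem.Set.ofList lost)
  let lost2 := lost1.filter (fun s => !(reserve.contains s))
  let finalLost := pvALoop reserveSet [] lost2
  n - finalLost.length

-- ===== PORT B =====
-- two-pointer merge: walk the sorted spares once (the suffix of `rest` models the index j)
def pvBLoop (reserve : List Int) : List Int → List Int → Int
  | _, [] => 0
  | rest, s :: ls =>
    if reserve.contains s then pvBLoop reserve rest ls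
    else
      match rest.dropWhile (fun r => decide (r < s - 1)) with
      | [] => 1 + pvBLoop reserve [] ls
      | r :: rest' =>
        if r = s - 1 || r = s + 1 then pvBLoop reserve rest' ls
        else 1 + pvBLoop reserve (r :: rest') ls

def solution_alt (n : Int) (lost : List Int) (reserve : List Int) : Int :=
  let lost1 := PySem.List.sorted lost (fun x => x) false
  let rest := PySem.List.sorted (PySem.Set.diff (PySem.Set.ofList reserve) (PySem.Set.ofList lost)) (fun x => x) false
  n - pvBLoop reserve rest lost1

-- ===== PRECONDITION & SPEC =====
def Spec_solution (n : Int) (lost : List Int) (reserve : List Int) (out : Int) : Prop := out = solution_alt n lost reserve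
instance (n : Int) (lost : List Int) (reserve : List Int) (out : Int) : Decidable (Spec_solution n lost reserve out) := by unfold Spec_solution; infer_instance

-- ===== CLAIM (what is proved, stated in full; the proofs are below) =====
def Claim_equal_solution : Prop := ∀ (n : Int) (lost : List Int) (reserve : List Int), Dom_solution n lost reserve → Spec_solution n lost reserve (solution n lost reserve)

-- ===== LEMMAS AND PROOFS =====

-- A's loop, counting only (= length of the final_lost it builds)
def pvACount : PySem.Set Int → List Int → Int
  | _, [] => 0
  | rs, s :: rest =>
    if PySem.Set.contains rs (s - 1) then pvACount (PySem.Set.discard rs (s - 1)) rest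
    else if PySem.Set.contains rs (s + 1) then pvACount (PySem.Set.discard rs (s + 1)) rest
    else 1 + pvACount rs rest

lemma pvALoop_length (ls : List Int) : ∀ (rs : PySem.Set Int) (fl : List Int),
    ((pvALoop rs fl ls).length : Int) = fl.length + pvACount rs ls := by
  induction ls with
  | nil => intro rs fl; simp [pvALoop, pvACount]
  | cons s rest ih =>
    intro rs fl
    simp only [pvALoop, pvACount]
    split_ifs with h1 h2 <;> simp [ih] <;> try ring

lemma pvDropWhile_head_ge (c : Int) : ∀ (l : List Int) (r : Int) (rest : List Int),
    l.dropWhile (fun x => decide (x < c)) = r :: rest → c ≤ r := by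
  intro l
  induction l with
  | nil => simp
  | cons a l ih =>
    intro r rest h
    rw [List.dropWhile_cons] at h
    by_cases ha : a < c
    · simp only [ha, decide_true, if_true] at h
      exact ih r rest h
    · simp only [ha, decide_false] at h
      cases h
      omega

-- the coupling: A's greedy on the mutable set = B's two-pointer on the sorted spare list
lemma pvCouple (reserve : List Int) : ∀ (ls S R : List Int),
    ls.Pairwise (· ≤ ·) → R.Pairwise (· < ·) →
    (∀ s ∈ ls, s ∉ R) →
    (∀ x : Int, (∃ s ∈ ls, s - 1 ≤ x) → (x ∈ S ↔ x ∈ R)) →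
    pvACount S (ls.filter (fun s => !(reserve.contains s))) = pvBLoop reserve R ls := by
  intro ls
  induction ls with
  | nil => intro S R _ _ _ _; simp [pvACount, pvBLoop]
  | cons s t ih =>
    intro S R hsort hR hni hag
    have hst : ∀ s' ∈ t, s ≤ s' := (List.pairwise_cons.mp hsort).1
    have hsort' : t.Pairwise (· ≤ ·) := (List.pairwise_cons.mp hsort).2
    have hnit : ∀ s' ∈ t, s' ∉ R := fun s' hs' => hni s' (List.mem_cons_of_mem _ hs')
    by_cases hres : s ∈ reserve
    · -- s has spare clothes of its own: A's filter drops it, B skips it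
      have hres' : reserve.contains s = true := List.contains_iff_mem.mpr hres
      rw [List.filter_cons_of_neg (by simpa using hres)]
      simp only [pvBLoop, hres', if_true]
      exact ih S R hsort' hR hnit
        (fun x hx => hag x (by obtain ⟨s', hs', h⟩ := hx; exact ⟨s', List.mem_cons_of_mem _ hs', h⟩))
    · have hres' : reserve.contains s = false := by
        rw [← Bool.not_eq_true]; exact fun h => hres (List.contains_iff_mem.mp h)
      rw [List.filter_cons_of_pos (by simpa using hres)]
      simp only [pvACount, pvBLoop, hres', Bool.false_eq_true, if_false]
      -- facts about the dropWhile split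
      have hsplit : R.takeWhile (fun r => decide (r < s - 1)) ++
          R.dropWhile (fun r => decide (r < s - 1)) = R := List.takeWhile_append_dropWhile
      have htake_lt : ∀ x ∈ R.takeWhile (fun r => decide (r < s - 1)), x < s - 1 := by
        intro x hx
        simpa using List.mem_takeWhile_imp hx
      have hmemRR' : ∀ x : Int, s - 1 ≤ x →
          (x ∈ R ↔ x ∈ R.dropWhile (fun r => decide (r < s - 1))) := by
        intro x hx
        constructor
        · intro h
          rw [← hsplit] at h
          rcases List.mem_append.mp h with h | h
          · exact absurd (htake_lt x h) (by omega)
          · exact h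
        · intro h
          rw [← hsplit]
          exact List.mem_append.mpr (Or.inr h)
      have hagR' : ∀ x : Int, s - 1 ≤ x →
          (x ∈ S ↔ x ∈ R.dropWhile (fun r => decide (r < s - 1))) := fun x hx =>
        (hag x ⟨s, List.mem_cons_self, hx⟩).trans (hmemRR' x hx)
      have hagT : ∀ x : Int, (∃ s' ∈ t, s' - 1 ≤ x) → s - 1 ≤ x := by
        rintro x ⟨s', hs', hx⟩
        have := hst s' hs'
        omega
      have hR'pair : (R.dropWhile (fun r => decide (r < s - 1))).Pairwise (· < ·) :=
        hR.sublist (List.dropWhile_sublist _)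
      have hR'sub : ∀ y ∈ R.dropWhile (fun r => decide (r < s - 1)), y ∈ R :=
        fun y hy => (List.dropWhile_sublist _).mem hy
      have hsnotR : s ∉ R := hni s List.mem_cons_self
      cases hcase : R.dropWhile (fun r => decide (r < s - 1)) with
      | nil =>
        have hnS : ∀ x : Int, s - 1 ≤ x → x ∉ S := by
          intro x hx hmem
          rw [hagR' x hx, hcase] at hmem
          exact List.not_mem_nil hmem
        have hc1 : PySem.Set.contains S (s - 1) = false := by
          rw [← Bool.not_eq_true]
          exact fun h => hnS (s - 1) (by omega) ((PySem.Set.contains_iff S (s - 1)).mp h)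
        have hc2 : PySem.Set.contains S (s + 1) = false := by
          rw [← Bool.not_eq_true]
          exact fun h => hnS (s + 1) (by omega) ((PySem.Set.contains_iff S (s + 1)).mp h)
        simp only [hc1, hc2, Bool.false_eq_true, if_false]
        have := ih S [] hsort' (List.Pairwise.nil) (by simp) (by
          intro x hx
          have hsx := hagT x hx
          rw [hagR' x hsx, hcase])
        rw [this]
      | cons r R'' =>
        have hr_ge : s - 1 ≤ r := pvDropWhile_head_ge (s - 1) R r R'' hcase
        have hrR : r ∈ R := hR'sub r (by rw [hcase]; exact List.mem_cons_self)
        have hrne : r ≠ s := fun h => hsnotR (h ▸ hrR)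
        have hR''gt : ∀ y ∈ R'', r < y := by
          have h' := hR'pair
          rw [hcase] at h'
          exact (List.pairwise_cons.mp h').1
        have hR''pair : R''.Pairwise (· < ·) := by
          have h' := hR'pair
          rw [hcase] at h'
          exact (List.pairwise_cons.mp h').2
        have hR''sub : ∀ y ∈ R'', y ∈ R :=
          fun y hy => hR'sub y (by rw [hcase]; exact List.mem_cons_of_mem _ hy)
        have hmS1 : (s - 1) ∈ S ↔ r = s - 1 := by
          rw [hagR' (s - 1) (by omega), hcase]
          simp only [List.mem_cons]
          constructor
          · rintro (h | h)
            · exact h.symm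
            · exact absurd (hR''gt _ h) (by omega)
          · intro h
            exact Or.inl h.symm
        by_cases hr1 : r = s - 1
        · have hc1 : PySem.Set.contains S (s - 1) = true :=
            (PySem.Set.contains_iff S (s - 1)).mpr (hmS1.mpr hr1)
          simp only [hc1, if_true, hr1, decide_true, Bool.true_or]
          apply ih (PySem.Set.discard S (s - 1)) R'' hsort' hR''pair
            (fun s' hs' h => hnit s' hs' (hR''sub _ h))
          intro x hx
          have hsx := hagT x hx
          rw [PySem.Set.mem_discard]
          constructor
          · rintro ⟨hxS, hxne⟩
            have h' := (hagR' x hsx).mp hxS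
            rw [hcase] at h'
            rcases List.mem_cons.mp h' with h' | h'
            · exact absurd (h' ▸ hr1) (by exact fun hh => hxne hh)
            · exact h'
          · intro hx''
            refine ⟨(hagR' x hsx).mpr (by rw [hcase]; exact List.mem_cons_of_mem _ hx''), ?_⟩
            have := hR''gt x hx''
            omega
        · have hge1 : s + 1 ≤ r := by omega
          have hmS2 : (s + 1) ∈ S ↔ r = s + 1 := by
            rw [hagR' (s + 1) (by omega), hcase]
            simp only [List.mem_cons]
            constructor
            · rintro (h | h)
              · exact h.symm
              · exact absurd (hR''gt _ h) (by omega)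
            · intro h
              exact Or.inl h.symm
          have hc1 : PySem.Set.contains S (s - 1) = false := by
            rw [← Bool.not_eq_true]
            exact fun h => hr1 (hmS1.mp ((PySem.Set.contains_iff S (s - 1)).mp h))
          by_cases hr2 : r = s + 1
          · have hc2 : PySem.Set.contains S (s + 1) = true :=
              (PySem.Set.contains_iff S (s + 1)).mpr (hmS2.mpr hr2)
            simp only [hc1, hc2, Bool.false_eq_true, if_false, if_true, hr2, decide_true,
              Bool.or_true]
            apply ih (PySem.Set.discard S (s + 1)) R'' hsort' hR''pair
              (fun s' hs' h => hnit s' hs' (hR''sub _ h))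
            intro x hx
            have hsx := hagT x hx
            rw [PySem.Set.mem_discard]
            constructor
            · rintro ⟨hxS, hxne⟩
              have h' := (hagR' x hsx).mp hxS
              rw [hcase] at h'
              rcases List.mem_cons.mp h' with h' | h'
              · exact absurd (h' ▸ hr2) (by exact fun hh => hxne hh)
              · exact h'
            · intro hx''
              refine ⟨(hagR' x hsx).mpr (by rw [hcase]; exact List.mem_cons_of_mem _ hx''), ?_⟩
              have := hR''gt x hx''
              omega
          · have hc2 : PySem.Set.contains S (s + 1) = false := by
              rw [← Bool.not_eq_true]
              exact fun h => hr2 (hmS2.mp ((PySem.Set.contains_iff S (s + 1)).mp h))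
            have hd1 : decide (r = s - 1) = false := by simp [hr1]
            have hd2 : decide (r = s + 1) = false := by simp [hr2]
            simp only [hc1, hc2, hd1, hd2, Bool.false_eq_true, if_false, Bool.or_false]
            have := ih S (r :: R'') hsort' (by rw [← hcase]; exact hR'pair)
              (fun s' hs' h => hnit s' hs' (by rw [← hcase] at h; exact hR'sub _ h))
              (by
                intro x hx
                have hsx := hagT x hx
                rw [hagR' x hsx, hcase])
            rw [this]

lemma pvPairwise_lt_of_le_nodup (l : List Int) (h1 : l.Pairwise (· ≤ ·)) (h2 : l.Nodup) :
    l.Pairwise (· < ·) := by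
  have := List.Pairwise.and h1 h2
  exact this.imp (fun h => lt_of_le_of_ne h.1 h.2)

-- ===== VERDICT (by name: the statement is the Claim_ definition above) =====
theorem solution_spec : Claim_equal_solution := by
  intro n lost reserve _
  unfold Spec_solution solution solution_alt
  simp only []
  have hfin := pvALoop_length
    ((PySem.List.sorted lost (fun x => x) false).filter (fun s => !(reserve.contains s)))
    (PySem.Set.diff (PySem.Set.ofList reserve) (PySem.Set.ofList lost)) []
  have hcple := pvCouple reserve (PySem.List.sorted lost (fun x => x) false)
    (PySem.Set.diff (PySem.Set.ofList reserve) (PySem.Set.ofList lost))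
    (PySem.List.sorted (PySem.Set.diff (PySem.Set.ofList reserve) (PySem.Set.ofList lost)) (fun x => x) false)
    (by simpa using PySem.List.sorted_pairwise lost (fun x => x))
    (by
      apply pvPairwise_lt_of_le_nodup
      · simpa using PySem.List.sorted_pairwise _ (fun x => x)
      · exact ((PySem.List.sorted_perm _ _ _).nodup_iff).mpr
          (PySem.Set.nodup_diff _ _ (PySem.Set.nodup_ofList reserve)))
    (by
      intro s hs hmem
      rw [PySem.List.mem_sorted] at hs hmem
      rw [PySem.Set.mem_diff] at hmem
      exact hmem.2 ((PySem.Set.mem_ofList lost s).mpr hs))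
    (by
      intro x _
      rw [PySem.List.mem_sorted])
  rw [hfin, hcple]
  simp
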